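-- pv_equiv track=rewrite | github.com/pandesanskruti/python-programs | Crypt_kicker2.py | decrypt_line
-- ===== SOURCE A (Python) =====
-- def decrypt_line(encrypted_line, key_sentence):
--     key_sentence = key_sentence.replace(' ', '')
--     encrypted_line = encrypted_line.replace(' ', '')
--     if len(encrypted_line) != len(key_sentence):
--         return None
--
--     key_map = {}
--     for encrypted_char, key_char in zip(encrypted_line, key_sentence):
--         if encrypted_char not in key_map:
--             key_map[encrypted_char] = key_char
--         elif key_map[encrypted_char] != key_char:
--             return None
--
--     decrypted_line = ''.join([key_map[char] for char in encrypted_line])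
--     return decrypted_line
-- ===== SOURCE B (Python) =====
-- def decrypt_line(encrypted_line, key_sentence):
--     encrypted_line = encrypted_line.replace(' ', '')
--     key_sentence = key_sentence.replace(' ', '')
--     if len(encrypted_line) != len(key_sentence):
--         return None
--     pairs = list(zip(encrypted_line, key_sentence))
--     if len(set(pairs)) != len(set(encrypted_line)):
--         return None
--     key_map = dict(pairs)
--     return ''.join(key_map[c] for c in encrypted_line)
-- ===== Notes on version B (the rewrite author's own statement) =====
-- stated objective: idiomatic
-- what changed: B replaces the guarded incremental dict-building loop with a declarative set-algebra consistency check (len(set(zip(e,k))) == len(set(e))) followed by a one-shot dict(zip) build and join.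
import Mathlib
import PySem

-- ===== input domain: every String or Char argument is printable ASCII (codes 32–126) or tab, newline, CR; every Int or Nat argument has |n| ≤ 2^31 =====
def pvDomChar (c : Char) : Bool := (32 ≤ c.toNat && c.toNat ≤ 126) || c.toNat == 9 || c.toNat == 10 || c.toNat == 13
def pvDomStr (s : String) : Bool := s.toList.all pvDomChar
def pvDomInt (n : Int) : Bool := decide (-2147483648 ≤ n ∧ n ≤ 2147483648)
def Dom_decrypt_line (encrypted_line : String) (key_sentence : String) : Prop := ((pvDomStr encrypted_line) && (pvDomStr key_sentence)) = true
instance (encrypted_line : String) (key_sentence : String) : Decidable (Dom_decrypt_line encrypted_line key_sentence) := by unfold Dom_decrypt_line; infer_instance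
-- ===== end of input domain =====

-- B replaces A's guarded incremental mapping loop with a set-algebra consistency check plus a one-shot dict(zip) build; same cost, more declarative.

-- ===== PORT A =====
-- the for-loop over zip(encrypted_line, key_sentence) building key_map, aborting on a conflict
def dlAloop : List (Char × Char) → PySem.Dict Char Char → Option (PySem.Dict Char Char)
  | [], m => some m
  | p :: rest, m =>
    match m.get? p.1 with
    | none => dlAloop rest (m.insert p.1 p.2)
    | some v => if v = p.2 then dlAloop rest m else none

def decrypt_line (encrypted_line : String) (key_sentence : String) : Option String :=
  let ks := (PySem.Str.replace key_sentence " " "").toList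
  let el := (PySem.Str.replace encrypted_line " " "").toList
  if el.length ≠ ks.length then none
  else
    match dlAloop (el.zip ks) PySem.Dict.empty with
    | none => none
    -- key_map[char]: every char of el is a key of m here, so the .getD default is never used
    | some m => some (String.ofList (el.map (fun c => (m.get? c).getD ' ')))

-- ===== PORT B =====
def decrypt_line_alt (encrypted_line : String) (key_sentence : String) : Option String :=
  let el := (PySem.Str.replace encrypted_line " " "").toList
  let ks := (PySem.Str.replace key_sentence " " "").toList
  if el.length ≠ ks.length then none
  else
    let pairs := el.zip ks
    if (PySem.Set.ofList pairs).length ≠ (PySem.Set.ofList el).length then none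
    else
      let m := PySem.Dict.ofList pairs
      -- key_map[c]: every c of el is a key of m here, so the .getD default is never used
      some (String.ofList (el.map (fun c => (m.get? c).getD ' ')))

-- ===== PRECONDITION & SPEC =====
def Spec_decrypt_line (encrypted_line : String) (key_sentence : String) (out : Option String) : Prop := out = decrypt_line_alt encrypted_line key_sentence
instance (encrypted_line : String) (key_sentence : String) (out : Option String) : Decidable (Spec_decrypt_line encrypted_line key_sentence out) := by unfold Spec_decrypt_line; infer_instance

-- ===== CLAIM (what is proved, stated in full; the proofs are below) =====
def Claim_equal_decrypt_line : Prop := ∀ (encrypted_line : String) (key_sentence : String), Dom_decrypt_line encrypted_line key_sentence → Spec_decrypt_line encrypted_line key_sentence (decrypt_line encrypted_line key_sentence)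

-- ===== LEMMAS AND PROOFS =====

-- first match in the zipped pair list
def fm (zl : List (Char × Char)) (x : Char) : Option Char :=
  (zl.find? (fun p => p.1 == x)).map Prod.snd

-- the pair list is a functional relation
def Cons (zl : List (Char × Char)) : Prop :=
  ∀ p ∈ zl, ∀ q ∈ zl, p.1 = q.1 → p.2 = q.2

-- the dict agrees with the pair list wherever it is already defined
def Compat (d : PySem.Dict Char Char) (zl : List (Char × Char)) : Prop :=
  ∀ p ∈ zl, ∀ v, d.get? p.1 = some v → v = p.2

theorem fm_cons (a : Char × Char) (t : List (Char × Char)) (x : Char) :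
    fm (a :: t) x = if a.1 = x then some a.2 else fm t x := by
  by_cases h : a.1 = x
  · simp [fm, List.find?, h]
  · have hb : (a.1 == x) = false := by simp [h]
    simp [fm, List.find?, h, hb]

theorem cons_cons {a : Char × Char} {t : List (Char × Char)} (h : Cons (a :: t)) : Cons t :=
  fun p hp q hq => h p (by simp [hp]) q (by simp [hq])

theorem compat_cons {d : PySem.Dict Char Char} {a : Char × Char} {t : List (Char × Char)}
    (h : Compat d (a :: t)) : Compat d t :=
  fun p hp => h p (by simp [hp])

theorem compat_insert {d : PySem.Dict Char Char} {a : Char × Char} {t : List (Char × Char)}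
    (hc : Cons (a :: t)) (h : Compat d (a :: t)) : Compat (d.insert a.1 a.2) t := by
  intro p hp v hv
  by_cases he : p.1 = a.1
  · rw [he, PySem.Dict.get?_insert_self] at hv
    have h2 : a.2 = p.2 := hc a (by simp) p (by simp [hp]) he.symm
    exact (Option.some.inj hv).symm.trans h2
  · rw [PySem.Dict.get?_insert_of_ne _ _ he] at hv
    exact h p (by simp [hp]) v hv

-- one loop step, fresh key: the whole-state condition is preserved in both directions
theorem step_none {d : PySem.Dict Char Char} {a : Char × Char} {t : List (Char × Char)}
    (hd : d.get? a.1 = none) :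
    (Cons (a :: t) ∧ Compat d (a :: t)) ↔ (Cons t ∧ Compat (d.insert a.1 a.2) t) := by
  constructor
  · rintro ⟨hc, hcp⟩; exact ⟨cons_cons hc, compat_insert hc hcp⟩
  · rintro ⟨hc, hcp⟩
    constructor
    · intro p hp q hq he
      rcases List.mem_cons.mp hp with hpa | hp <;> rcases List.mem_cons.mp hq with hqa | hq
      · rw [hpa, hqa]
      · have he' : a.1 = q.1 := by rw [← he, hpa]
        rw [hpa]
        exact hcp q hq a.2 (by rw [← he', PySem.Dict.get?_insert_self])
      · have he' : p.1 = a.1 := by rw [he, hqa]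
        rw [hqa]
        exact (hcp p hp a.2 (by rw [he', PySem.Dict.get?_insert_self])).symm
      · exact hc p hp q hq he
    · intro p hp v hv
      rcases List.mem_cons.mp hp with hpa | hp
      · rw [hpa, hd] at hv; cases hv
      · by_cases he : p.1 = a.1
        · rw [he, hd] at hv; cases hv
        · exact hcp p hp v (by rwa [PySem.Dict.get?_insert_of_ne _ _ he])

-- one loop step, key already mapped to the same value
theorem step_some {d : PySem.Dict Char Char} {a : Char × Char} {t : List (Char × Char)}
    (hd : d.get? a.1 = some a.2) :
    (Cons (a :: t) ∧ Compat d (a :: t)) ↔ (Cons t ∧ Compat d t) := by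
  constructor
  · rintro ⟨hc, hcp⟩; exact ⟨cons_cons hc, compat_cons hcp⟩
  · rintro ⟨hc, hcp⟩
    constructor
    · intro p hp q hq he
      rcases List.mem_cons.mp hp with hpa | hp <;> rcases List.mem_cons.mp hq with hqa | hq
      · rw [hpa, hqa]
      · have he' : a.1 = q.1 := by rw [← he, hpa]
        rw [hpa]
        exact hcp q hq a.2 (by rw [← he', hd])
      · have he' : p.1 = a.1 := by rw [he, hqa]
        rw [hqa]
        exact (hcp p hp a.2 (by rw [he', hd])).symm
      · exact hc p hp q hq he
    · intro p hp v hv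
      rcases List.mem_cons.mp hp with hpa | hp
      · rw [hpa]
        rw [hpa, hd] at hv
        exact (Option.some.inj hv).symm
      · exact hcp p hp v hv

-- A's loop succeeds when the pairs are consistent and compatible with the dict,
-- and then a lookup is d's entry first, else the first match in the pair list
theorem dlAloop_some (zl : List (Char × Char)) : ∀ (d : PySem.Dict Char Char),
    Cons zl → Compat d zl →
    ∃ m, dlAloop zl d = some m ∧ ∀ x, m.get? x = (d.get? x).or (fm zl x) := by
  induction zl with
  | nil => intro d _ _; exact ⟨d, rfl, by simp [fm]⟩
  | cons a t ih =>
    intro d hc hcp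
    match hd : d.get? a.1 with
    | none =>
      obtain ⟨m, hm, hx⟩ := ih (d.insert a.1 a.2) (cons_cons hc) (compat_insert hc hcp)
      refine ⟨m, by simpa [dlAloop, hd], ?_⟩
      intro x
      rw [hx x, fm_cons]
      by_cases he : a.1 = x
      · subst he; rw [PySem.Dict.get?_insert_self, hd]; simp
      · rw [PySem.Dict.get?_insert_of_ne _ _ (Ne.symm he)]; simp [he]
    | some v =>
      have hv : v = a.2 := hcp a (by simp) v hd
      obtain ⟨m, hm, hx⟩ := ih d (cons_cons hc) (compat_cons hcp)
      refine ⟨m, by simp [dlAloop, hd, hv, hm], ?_⟩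
      intro x
      rw [hx x, fm_cons]
      by_cases he : a.1 = x
      · subst he; rw [hd, hv]; simp
      · simp [he]

-- A's loop fails as soon as the whole-state condition fails
theorem dlAloop_none (zl : List (Char × Char)) : ∀ (d : PySem.Dict Char Char),
    ¬ (Cons zl ∧ Compat d zl) → dlAloop zl d = none := by
  induction zl with
  | nil =>
    intro d H
    exact absurd ⟨fun p hp => absurd hp (by simp), fun p hp => absurd hp (by simp)⟩ H
  | cons a t ih =>
    intro d H
    match hd : d.get? a.1 with
    | none =>
      simpa [dlAloop, hd] using ih _ (fun h => H ((step_none hd).mpr h))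
    | some v =>
      by_cases hv : v = a.2
      · subst hv
        simpa [dlAloop, hd] using ih _ (fun h => H ((step_some hd).mpr h))
      · simp [dlAloop, hd, hv]

-- dict(zip) lookups under the same condition are first matches too
theorem get?_update_eq (zl : List (Char × Char)) : ∀ (d : PySem.Dict Char Char),
    Cons zl → Compat d zl → ∀ x, (d.update zl).get? x = (d.get? x).or (fm zl x) := by
  induction zl with
  | nil => intro d _ _ x; simp [fm, PySem.Dict.update]
  | cons a t ih =>
    intro d hc hcp x
    have hupd : d.update (a :: t) = (d.insert a.1 a.2).update t := rfl
    rw [hupd, ih _ (cons_cons hc) (compat_insert hc hcp) x, fm_cons]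
    by_cases he : a.1 = x
    · subst he
      rw [PySem.Dict.get?_insert_self]
      match hd : d.get? a.1 with
      | none => simp
      | some v => rw [hcp a (by simp) v hd]; simp
    · rw [PySem.Dict.get?_insert_of_ne _ _ (Ne.symm he)]
      simp [he]

theorem len_ofList_eq_card {α : Type} [BEq α] [LawfulBEq α] [DecidableEq α] (xs : List α) :
    (PySem.Set.ofList xs).length = xs.toFinset.card := by
  have h1 : (PySem.Set.ofList xs).toFinset = xs.toFinset := by
    ext y; simp [PySem.Set.mem_ofList]
  calc (PySem.Set.ofList xs).length
      = (PySem.Set.ofList xs).toFinset.card := (List.toFinset_card_of_nodup (PySem.Set.nodup_ofList xs)).symm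
    _ = xs.toFinset.card := by rw [h1]

-- the set-cardinality test is exactly consistency
theorem card_iff_cons (zl : List (Char × Char)) :
    (PySem.Set.ofList zl).length = (PySem.Set.ofList (zl.map Prod.fst)).length ↔ Cons zl := by
  rw [len_ofList_eq_card, len_ofList_eq_card]
  have himg : (List.map Prod.fst zl).toFinset = zl.toFinset.image Prod.fst := by
    ext y; simp
  rw [himg]
  constructor
  · intro h p hp q hq he
    have hinj := Finset.card_image_iff.mp h.symm
    have hp' : p ∈ (zl.toFinset : Set (Char × Char)) := by simp [hp]
    have hq' : q ∈ (zl.toFinset : Set (Char × Char)) := by simp [hq]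
    rw [hinj hp' hq' he]
  · intro hc
    exact (Finset.card_image_of_injOn (fun p hp q hq he =>
      Prod.ext he (hc p (by simpa using hp) q (by simpa using hq) he))).symm

theorem compat_empty (zl : List (Char × Char)) : Compat PySem.Dict.empty zl := by
  intro p _ v hv
  simp [PySem.Dict.get?_empty] at hv

-- ===== VERDICT (by name: the statement is the Claim_ definition above) =====
theorem decrypt_line_spec : Claim_equal_decrypt_line := by
  intro e k _
  unfold Spec_decrypt_line decrypt_line decrypt_line_alt
  set el := (PySem.Str.replace e " " "").toList with hel
  set ks := (PySem.Str.replace k " " "").toList with hks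
  by_cases hlen : el.length ≠ ks.length
  · simp [hlen]
  · have hlen : el.length = ks.length := not_ne_iff.mp hlen
    have hmap : (el.zip ks).map Prod.fst = el := List.map_fst_zip (le_of_eq hlen)
    by_cases hc : Cons (el.zip ks)
    · have hcard : (PySem.Set.ofList (el.zip ks)).length = (PySem.Set.ofList el).length := by
        have h := (card_iff_cons (el.zip ks)).mpr hc
        rwa [hmap] at h
      obtain ⟨m, hm, hx⟩ := dlAloop_some (el.zip ks) PySem.Dict.empty hc (compat_empty _)
      have hB : ∀ x, m.get? x = (PySem.Dict.ofList (el.zip ks)).get? x := by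
        intro x
        have hof : PySem.Dict.ofList (el.zip ks) = PySem.Dict.empty.update (el.zip ks) := rfl
        rw [hx x, hof, get?_update_eq _ _ hc (compat_empty _) x]
      simp only [hlen, hcard, hm]
      simp [hB]
    · have hA := dlAloop_none (el.zip ks) PySem.Dict.empty (fun h => hc h.1)
      have hcard : (PySem.Set.ofList (el.zip ks)).length ≠ (PySem.Set.ofList el).length := by
        intro h
        apply hc
        apply (card_iff_cons (el.zip ks)).mp
        rw [hmap]; exact h
      simp [hlen, hA, hcard]
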